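-- pv_equiv track=rewrite | github.com/GeonH0/Algorithm | 프로그래머스/2/169199. 리코쳇 로봇/리코쳇 로봇.py | solution
-- ===== SOURCE A (Python) =====
-- from collections import deque
--
-- def solution(board):
--     def bfs(si, sj):
--         q = deque()
--         q.append((si, sj))
--         v = [[0] * C for _ in range(R)]
--         v[si][sj] = 1
--
--         dx = [-1, 1, 0, 0]
--         dy = [0, 0, -1, 1]
--
--         while q:
--             ci,cj = q.popleft()
--             if board[ci][cj] == 'G':
--                 return v[ci][cj]
--
--             for i in range(4):
--                 ni,nj = ci,cj
--                 while True:
--                     ni += dx[i]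
--                     nj += dy[i]
--                     if (ni < 0 or ni >= R or nj < 0 or nj >= C) or board[ni][nj]=='D':
--                         ni -= dx[i]
--                         nj -= dy[i]
--                         break
--
--                 if v[ni][nj] == 0:
--                     v[ni][nj] = v[ci][cj] +1
--                     q.append((ni,nj))
--
--     R = len(board)
--     C = len(board[0])
--     ans = float('inf')
--
--     for i in range(R):
--         for j in range(C):
--             if board[i][j] == 'R':
--                 result = bfs(i,j)
--                 if result is not None and result < ans:
--                     ans = result
--
--     answer = ans -1 if ans != float('inf') else -1
--     return answer
-- ===== SOURCE B (Python) =====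
-- def solution(board):
--     R, C = len(board), len(board[0])
--
--     def slide(i, j, di, dj):
--         while 0 <= i + di < R and 0 <= j + dj < C and board[i + di][j + dj] != 'D':
--             i += di
--             j += dj
--         return (i, j)
--
--     frontier = [(i, j) for i in range(R) for j in range(C) if board[i][j] == 'R']
--     visited = set(frontier)
--     d = 0
--     while frontier:
--         if any(board[i][j] == 'G' for i, j in frontier):
--             return d
--         nxt = []
--         for (i, j) in frontier:
--             for (di, dj) in ((-1, 0), (1, 0), (0, -1), (0, 1)):
--                 n = slide(i, j, di, dj)
--                 if n not in visited:
--                     visited.add(n)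
--                     nxt.append(n)
--         frontier = nxt
--         d += 1
--     return -1
-- ===== Notes on version B (the rewrite author's own statement) =====
-- stated objective: alternative
-- what changed: Replaces A's per-robot BFS runs (a fresh distance grid and queue for every 'R' cell, min-folded over runs) by one level-synchronous multi-source BFS: a visited set and a frontier list advanced level by level with a level counter, no distance bookkeeping at all.
import Mathlib
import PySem

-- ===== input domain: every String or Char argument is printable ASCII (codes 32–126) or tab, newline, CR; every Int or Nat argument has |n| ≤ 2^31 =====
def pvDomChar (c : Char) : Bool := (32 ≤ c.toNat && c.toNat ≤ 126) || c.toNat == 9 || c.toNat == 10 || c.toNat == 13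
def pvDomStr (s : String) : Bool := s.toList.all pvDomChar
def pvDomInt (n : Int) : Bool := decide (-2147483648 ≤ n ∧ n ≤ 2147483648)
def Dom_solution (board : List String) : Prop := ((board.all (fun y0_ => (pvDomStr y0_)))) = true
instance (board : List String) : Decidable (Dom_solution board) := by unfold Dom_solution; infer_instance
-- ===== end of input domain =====

-- B replaces A's per-robot BFS runs (fresh distance grid per 'R' cell, minimum over runs) by one
-- level-synchronous multi-source BFS over a visited set with a level counter; equal on Pre_solution.

-- ===== PORT A =====

-- board[i][j]; every access the admitted inputs reach is in range, so the default is never returned there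
def pvCharAt (board : List String) (i j : Int) : Char :=
  ((PySem.List.pyGet? board i).bind (fun s => PySem.Str.pyGet? s j)).getD '?'

-- the inner `while True` slide loop of A; fuel bounds the iterations ((R+C)+1 always suffices:
-- each step moves one coordinate by ±1 and stays inside the R×C grid)
def pvSlideA (board : List String) (R C dx dy : Int) : Nat → Int × Int → Int × Int
  | 0, p => p
  | fuel + 1, (ni, nj) =>
    if ni + dx < 0 ∨ ni + dx ≥ R ∨ nj + dy < 0 ∨ nj + dy ≥ C ∨
        pvCharAt board (ni + dx) (nj + dy) = 'D'
    then (ni, nj)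
    else pvSlideA board R C dx dy fuel (ni + dx, nj + dy)

-- the landing cell for direction index i (dx = [-1,1,0,0], dy = [0,0,-1,1] as in A)
def pvNbr (board : List String) (R C : Int) (i : Nat) (c : Int × Int) : Int × Int :=
  pvSlideA board R C ([(-1 : Int), 1, 0, 0].getD i 0) ([(0 : Int), 0, -1, 1].getD i 0)
    ((R + C).toNat + 1) c

-- v[i][j] (Nat-valued visited/distance grid; all indices the algorithm uses are in range)
def pvGetv (R C : Int) (v : List (List Nat)) (c : Int × Int) : Option Nat :=
  if 0 ≤ c.1 ∧ c.1 < R ∧ 0 ≤ c.2 ∧ c.2 < C then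
    (v[c.1.toNat]?).bind (fun r => r[c.2.toNat]?)
  else none

-- v[i][j] = x
def pvSetv (R C : Int) (v : List (List Nat)) (c : Int × Int) (x : Nat) : List (List Nat) :=
  if 0 ≤ c.1 ∧ c.1 < R ∧ 0 ≤ c.2 ∧ c.2 < C then
    v.set c.1.toNat (((v[c.1.toNat]?).getD []).set c.2.toNat x)
  else v

-- number of 0 entries of v: the BFS termination measure
def pvZeros (v : List (List Nat)) : Nat := (v.map (fun r => r.count 0)).sum

-- one direction i of A's `for i in range(4)` body
def pvStepA (board : List String) (R C : Int) (c : Int × Int)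
    (st : List (List Nat) × List (Int × Int)) (i : Nat) : List (List Nat) × List (Int × Int) :=
  let n := pvNbr board R C i c
  if pvGetv R C st.1 n = some 0 then
    (pvSetv R C st.1 n ((pvGetv R C st.1 c).getD 0 + 1), st.2 ++ [n])
  else st

def pvExpandA (board : List String) (R C : Int) (c : Int × Int)
    (st : List (List Nat) × List (Int × Int)) : List (List Nat) × List (Int × Int) :=
  (List.range 4).foldl (pvStepA board R C c) st

-- termination helpers for A's BFS loop (cited by `decreasing_by`)
theorem pv_sum_set_nat (l : List Nat) : ∀ (i : Nat) (a x : Nat), l[i]? = some x →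
    (l.set i a).sum + x = l.sum + a := by
  induction l with
  | nil => intro i a x h; simp at h
  | cons hd tl ih =>
    intro i a x h
    cases i with
    | zero => simp at h; subst h; simp [List.set]; omega
    | succ n =>
      simp only [List.getElem?_cons_succ] at h
      simp only [List.set, List.sum_cons]
      have := ih n a x h
      omega

theorem pv_count_set_nat (r : List Nat) : ∀ (j : Nat) (x : Nat), r[j]? = some 0 → x ≠ 0 →
    (r.set j x).count 0 + 1 = r.count 0 := by
  induction r with
  | nil => intro j x h; simp at h
  | cons hd tl ih =>
    intro j x h hx
    cases j with
    | zero =>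
      simp at h; subst h
      simp [List.set, hx]
    | succ n =>
      simp only [List.getElem?_cons_succ] at h
      simp only [List.set, List.count_cons]
      have := ih n x h hx
      omega

theorem pv_zeros_setv (R C : Int) (v : List (List Nat)) (c : Int × Int) (x : Nat)
    (h : pvGetv R C v c = some 0) (hx : x ≠ 0) :
    pvZeros (pvSetv R C v c x) + 1 = pvZeros v := by
  unfold pvGetv at h
  split at h
  case isFalse => simp at h
  case isTrue hin =>
    unfold pvSetv pvZeros
    rw [if_pos hin]
    obtain ⟨r, hr, hrj⟩ : ∃ r, v[c.1.toNat]? = some r ∧ r[c.2.toNat]? = some 0 := by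
      cases hv : v[c.1.toNat]? with
      | none => rw [hv] at h; simp at h
      | some r => exact ⟨r, rfl, by rw [hv] at h; simpa using h⟩
    rw [hr]
    simp only [Option.getD_some]
    rw [List.map_set]
    have hmap : (v.map (fun r => r.count 0))[c.1.toNat]? = some (r.count 0) := by
      rw [List.getElem?_map, hr]; rfl
    have h1 := pv_sum_set_nat (v.map (fun r => r.count 0)) c.1.toNat
      ((r.set c.2.toNat x).count 0) (r.count 0) hmap
    have h2 := pv_count_set_nat r c.2.toNat x hrj hx
    omega

theorem pv_push_measure (R C : Int) (v : List (List Nat)) (q : List (Int × Int))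
    (n : Int × Int) (m : Nat) :
    2 * pvZeros (if pvGetv R C v n = some 0 then (pvSetv R C v n (m + 1), q ++ [n]) else (v, q)).1
      + (if pvGetv R C v n = some 0 then (pvSetv R C v n (m + 1), q ++ [n]) else (v, q)).2.length
      ≤ 2 * pvZeros v + q.length := by
  split
  case isTrue h =>
    have := pv_zeros_setv R C v n (m + 1) h (by omega)
    simp only [List.length_append, List.length_cons, List.length_nil]
    omega
  case isFalse => simp

theorem pvStepA_measure (board : List String) (R C : Int) (c : Int × Int)
    (st : List (List Nat) × List (Int × Int)) (i : Nat) :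
    2 * pvZeros (pvStepA board R C c st i).1 + (pvStepA board R C c st i).2.length
      ≤ 2 * pvZeros st.1 + st.2.length := by
  have := pv_push_measure R C st.1 st.2 (pvNbr board R C i c) ((pvGetv R C st.1 c).getD 0)
  simpa [pvStepA] using this

theorem pv_foldl_measure {α : Type} (f : List (List Nat) × List (Int × Int) → α →
      List (List Nat) × List (Int × Int))
    (hf : ∀ st x, 2 * pvZeros (f st x).1 + (f st x).2.length ≤ 2 * pvZeros st.1 + st.2.length) :
    ∀ (l : List α) (st : List (List Nat) × List (Int × Int)),
      2 * pvZeros (l.foldl f st).1 + (l.foldl f st).2.length ≤ 2 * pvZeros st.1 + st.2.length := by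
  intro l
  induction l with
  | nil => intro st; simp
  | cons x xs ih => intro st; exact le_trans (ih (f st x)) (hf st x)

theorem pvExpandA_measure (board : List String) (R C : Int) (c : Int × Int)
    (v : List (List Nat)) (q : List (Int × Int)) :
    2 * pvZeros (pvExpandA board R C c (v, q)).1 + (pvExpandA board R C c (v, q)).2.length
      ≤ 2 * pvZeros v + q.length := by
  have := pv_foldl_measure (pvStepA board R C c) (pvStepA_measure board R C c) (List.range 4) (v, q)
  simpa [pvExpandA] using this

-- A's `while q` BFS loop
def pvBfsA (board : List String) (R C : Int) : List (Int × Int) → List (List Nat) → Option Nat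
  | [], _ => none
  | c :: q, v =>
    if pvCharAt board c.1 c.2 = 'G' then some ((pvGetv R C v c).getD 0)
    else
      pvBfsA board R C (pvExpandA board R C c (v, q)).2 (pvExpandA board R C c (v, q)).1
  termination_by q v => 2 * pvZeros v + q.length
  decreasing_by
    have := pvExpandA_measure board R C c v q
    simp only [List.length_cons]
    omega

-- A: for every 'R' cell run a fresh single-source BFS, keep the minimum result
def solution (board : List String) : Int :=
  let R : Int := (board.length : Int)
  let C : Int := PySem.Str.len ((PySem.List.pyGet? board 0).getD "")
  let ans : Option Nat :=
    (List.range R.toNat).foldl (fun ans (i : Nat) =>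
      (List.range C.toNat).foldl (fun ans (j : Nat) =>
        if pvCharAt board (i : Int) (j : Int) = 'R' then
          let result := pvBfsA board R C [((i : Int), (j : Int))]
            (pvSetv R C (List.replicate R.toNat (List.replicate C.toNat 0)) ((i : Int), (j : Int)) 1)
          match result, ans with
          | some r, some a => if r < a then some r else ans
          | some r, none => some r
          | none, _ => ans
        else ans) ans) (none : Option Nat)
  match ans with
  | some a => (a : Int) - 1
  | none => -1

-- ===== PORT B =====

-- B's slide helper (`while 0 <= i+di < R and 0 <= j+dj < C and board[i+di][j+dj] != 'D'`)
def pvSlideB (board : List String) (R C di dj : Int) : Nat → Int × Int → Int × Int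
  | 0, p => p
  | fuel + 1, (ni, nj) =>
    if 0 ≤ ni + di ∧ ni + di < R ∧ 0 ≤ nj + dj ∧ nj + dj < C ∧
        pvCharAt board (ni + di) (nj + dj) ≠ 'D'
    then pvSlideB board R C di dj fuel (ni + di, nj + dj)
    else (ni, nj)

-- the four landing cells of one frontier cell (B's inner `for (di, dj) in …` with `slide`)
def pvNbrsB (board : List String) (R C : Int) (c : Int × Int) : List (Int × Int) :=
  [((-1 : Int), (0 : Int)), (1, 0), (0, -1), (0, 1)].map
    (fun d => pvSlideB board R C d.1 d.2 ((R + C).toNat + 1) c)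

-- B's body for one frontier cell: `for n in nbrs: if n not in visited: visited.add(n); nxt.append(n)`
def pvLevelStep (board : List String) (R C : Int)
    (st : PySem.Set (Int × Int) × List (Int × Int)) (c : Int × Int) :
    PySem.Set (Int × Int) × List (Int × Int) :=
  (pvNbrsB board R C c).foldl
    (fun st n => if PySem.Set.contains st.1 n then st else (PySem.Set.add st.1 n, st.2 ++ [n])) st

-- B's `while frontier` loop, one level per iteration; fuel = R*C+1 only makes the loop total
-- (levels are bounded by the number of grid cells, proved in pvLevels_main)
def pvLevelsB (board : List String) (R C : Int) :
    Nat → PySem.Set (Int × Int) → List (Int × Int) → Nat → Int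
  | 0, _, _, _ => -1
  | fuel + 1, visited, frontier, d =>
    if frontier.isEmpty then -1
    else if frontier.any (fun c => pvCharAt board c.1 c.2 == 'G') then (d : Int)
    else
      let st := frontier.foldl (pvLevelStep board R C) (visited, [])
      pvLevelsB board R C fuel st.1 st.2 (d + 1)

-- B: seed the frontier with all 'R' cells, walk it level by level counting slides
def solution_alt (board : List String) : Int :=
  let R : Int := (board.length : Int)
  let C : Int := PySem.Str.len ((PySem.List.pyGet? board 0).getD "")
  let frontier := (List.range R.toNat).flatMap (fun (i : Nat) =>
    (List.range C.toNat).filterMap (fun (j : Nat) =>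
      if pvCharAt board (i : Int) (j : Int) = 'R' then some ((i : Int), (j : Int)) else none))
  pvLevelsB board R C (R.toNat * C.toNat + 1) (PySem.Set.ofList frontier) frontier 0

-- ===== PRECONDITION & SPEC =====

-- Pre_ excludes exactly the inputs where the Python A may raise IndexError: the empty board
-- (len(board[0])) and boards with a row shorter than the first row (board[i][j] for j < C).
def Pre_solution (board : List String) : Prop :=
  board ≠ [] ∧ ∀ r ∈ board, (board.headD "").toList.length ≤ r.toList.length
instance (board : List String) : Decidable (Pre_solution board) := by
  unfold Pre_solution; infer_instance

def pvWitness_solution : List String := ["R..G", ".D..", "...."]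

def Spec_solution (board : List String) (out : Int) : Prop := out = solution_alt board
instance (board : List String) (out : Int) : Decidable (Spec_solution board out) := by
  unfold Spec_solution; infer_instance

-- ===== CLAIM (what is proved, stated in full; the proofs are below) =====
def Claim_equal_solution : Prop :=
  ∀ (board : List String), Dom_solution board → Pre_solution board →
    Spec_solution board (solution board)

-- ===== LEMMAS AND PROOFS =====

-- in-grid predicate
def pvInb (R C : Int) (c : Int × Int) : Prop := 0 ≤ c.1 ∧ c.1 < R ∧ 0 ≤ c.2 ∧ c.2 < C

theorem pvGetv_some (R C : Int) (v : List (List Nat)) (c : Int × Int) (a : Nat)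
    (h : pvGetv R C v c = some a) :
    (0 ≤ c.1 ∧ c.1 < R ∧ 0 ≤ c.2 ∧ c.2 < C) ∧
      ∃ r, v[c.1.toNat]? = some r ∧ r[c.2.toNat]? = some a := by
  unfold pvGetv at h
  split at h
  case isFalse => simp at h
  case isTrue hc =>
    refine ⟨hc, ?_⟩
    cases hv : v[c.1.toNat]? with
    | none => rw [hv] at h; simp at h
    | some r => exact ⟨r, rfl, by rw [hv] at h; simpa using h⟩

theorem pvGetv_setv (R C : Int) (v : List (List Nat)) (c x : Int × Int) (y a : Nat)
    (h : pvGetv R C v c = some a) :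
    pvGetv R C (pvSetv R C v c y) x = if x = c then some y else pvGetv R C v x := by
  obtain ⟨hc, r, hr, hrj⟩ := pvGetv_some R C v c a h
  have hil : c.1.toNat < v.length := (List.getElem?_eq_some_iff.mp hr).1
  have hjl : c.2.toNat < r.length := (List.getElem?_eq_some_iff.mp hrj).1
  unfold pvGetv pvSetv
  rw [if_pos hc, hr]
  simp only [Option.getD_some]
  by_cases hx : 0 ≤ x.1 ∧ x.1 < R ∧ 0 ≤ x.2 ∧ x.2 < C
  · rw [if_pos hx, if_pos hx]
    by_cases hxc : x = c
    · subst hxc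
      rw [if_pos rfl]
      rw [List.getElem?_set_self hil]
      simp [List.getElem?_set_self (l := r) hjl]
    · rw [if_neg hxc]
      by_cases h1 : x.1.toNat = c.1.toNat
      · have h1' : x.1 = c.1 := by omega
        have h2 : x.2.toNat ≠ c.2.toNat := by
          intro h2
          exact hxc (Prod.ext h1' (by omega))
        rw [h1', List.getElem?_set_self hil, hr]
        simp [List.getElem?_set_ne (Ne.symm h2)]
      · rw [List.getElem?_set_ne (by omega)]
  · rw [if_neg hx, if_neg hx, if_neg (by intro h'; exact hx (h' ▸ hc))]

theorem pvGetv_replicate (R C : Int) (c : Int × Int) (h : pvInb R C c) :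
    pvGetv R C (List.replicate R.toNat (List.replicate C.toNat 0)) c = some 0 := by
  obtain ⟨h1, h2, h3, h4⟩ := h
  unfold pvGetv
  rw [if_pos ⟨h1, h2, h3, h4⟩]
  rw [List.getElem?_replicate_of_lt (by omega)]
  simp [List.getElem?_replicate_of_lt (by omega : c.2.toNat < C.toNat)]

-- sliding never leaves the grid
theorem pvSlideA_inb (board : List String) (R C dx dy : Int) :
    ∀ (fuel : Nat) (c : Int × Int), pvInb R C c → pvInb R C (pvSlideA board R C dx dy fuel c) := by
  intro fuel
  induction fuel with
  | zero => intro c hc; exact hc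
  | succ n ih =>
    intro c hc
    obtain ⟨c1, c2⟩ := c
    unfold pvSlideA
    split
    case isTrue => exact hc
    case isFalse h =>
      push_neg at h
      exact ih (c1 + dx, c2 + dy) ⟨h.1, h.2.1, h.2.2.1, h.2.2.2.1⟩

theorem pvNbr_inb (board : List String) (R C : Int) (i : Nat) (c : Int × Int)
    (hc : pvInb R C c) : pvInb R C (pvNbr board R C i c) :=
  pvSlideA_inb board R C _ _ _ c hc

-- B's slide helper computes the same landing cell as A's slide loop
theorem pvSlideB_eq (board : List String) (R C dx dy : Int) :
    ∀ (fuel : Nat) (c : Int × Int),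
      pvSlideB board R C dx dy fuel c = pvSlideA board R C dx dy fuel c := by
  intro fuel
  induction fuel with
  | zero => intro c; rfl
  | succ n ih =>
    intro c
    obtain ⟨c1, c2⟩ := c
    unfold pvSlideA pvSlideB
    by_cases h : c1 + dx < 0 ∨ c1 + dx ≥ R ∨ c2 + dy < 0 ∨ c2 + dy ≥ C ∨
        pvCharAt board (c1 + dx) (c2 + dy) = 'D'
    · rw [if_pos h,
        if_neg (by
          rintro ⟨ha, hb, hc', hd, he⟩
          rcases h with h | h | h | h | h <;> first | omega | exact he h)]
    · rw [if_neg h, if_pos (by push_neg at h; exact ⟨by omega, by omega, by omega, by omega, h.2.2.2.2⟩)]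
      exact ih (c1 + dx, c2 + dy)

theorem pvNbrsB_eq (board : List String) (R C : Int) (c : Int × Int) :
    pvNbrsB board R C c = [pvNbr board R C 0 c, pvNbr board R C 1 c,
      pvNbr board R C 2 c, pvNbr board R C 3 c] := by
  simp [pvNbrsB, pvNbr, pvSlideB_eq]

theorem pv_mem_nbrsB (board : List String) (R C : Int) (c x : Int × Int) :
    x ∈ pvNbrsB board R C c ↔ ∃ i, i < 4 ∧ x = pvNbr board R C i c := by
  rw [pvNbrsB_eq]
  simp only [List.mem_cons, List.not_mem_nil, or_false]
  constructor
  · rintro (h | h | h | h)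
    exacts [⟨0, by omega, h⟩, ⟨1, by omega, h⟩, ⟨2, by omega, h⟩, ⟨3, by omega, h⟩]
  · rintro ⟨i, hi, rfl⟩
    interval_cases i <;> simp

-- cells reachable from the seed set S in at most k slides
def pvReach (board : List String) (R C : Int) (S : List (Int × Int)) : Nat → (Int × Int) → Prop
  | 0, c => c ∈ S
  | k + 1, c => pvReach board R C S k c ∨
      ∃ p, pvReach board R C S k p ∧ ∃ i, i < 4 ∧ c = pvNbr board R C i p

theorem pvReach_mono (board : List String) (R C : Int) (S : List (Int × Int))
    {k m : Nat} (h : k ≤ m) : ∀ c, pvReach board R C S k c → pvReach board R C S m c := by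
  induction m, h using Nat.le_induction with
  | base => exact fun c hc => hc
  | succ m _ ih => exact fun c hc => Or.inl (ih c hc)

theorem pvReach_inb (board : List String) (R C : Int) (S : List (Int × Int))
    (HS : ∀ s ∈ S, pvInb R C s) :
    ∀ (k : Nat) (c : Int × Int), pvReach board R C S k c → pvInb R C c := by
  intro k
  induction k with
  | zero => exact fun c hc => HS c hc
  | succ k ih =>
    intro c hc
    rcases hc with h1 | ⟨p, hp, i, _, rfl⟩
    · exact ih c h1
    · exact pvNbr_inb board R C i p (ih p hp)

theorem pvReach_union (board : List String) (R C : Int) (S : List (Int × Int)) :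
    ∀ (k : Nat) (c : Int × Int),
      pvReach board R C S k c ↔ ∃ s ∈ S, pvReach board R C [s] k c := by
  intro k
  induction k with
  | zero => intro c; simp [pvReach]
  | succ k ih =>
    intro c
    constructor
    · rintro (h1 | ⟨p, hp, i, hi, rfl⟩)
      · obtain ⟨s, hs, h⟩ := (ih c).mp h1
        exact ⟨s, hs, Or.inl h⟩
      · obtain ⟨s, hs, h⟩ := (ih p).mp hp
        exact ⟨s, hs, Or.inr ⟨p, h, i, hi, rfl⟩⟩
    · rintro ⟨s, hs, h1 | ⟨p, hp, i, hi, rfl⟩⟩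
      · exact Or.inl ((ih c).mpr ⟨s, hs, h1⟩)
      · exact Or.inr ⟨p, (ih p).mpr ⟨s, hs, hp⟩, i, hi, rfl⟩

theorem pvReach_stab (board : List String) (R C : Int) (S : List (Int × Int)) (m : Nat)
    (h : ∀ c, pvReach board R C S (m + 1) c → pvReach board R C S m c) :
    ∀ (k : Nat) (c : Int × Int), pvReach board R C S k c → pvReach board R C S m c := by
  have step : ∀ j, (∀ c, pvReach board R C S j c → pvReach board R C S m c) →
      ∀ c, pvReach board R C S (j + 1) c → pvReach board R C S m c := by
    intro j hj c hc
    rcases hc with h1 | ⟨p, hp, i, hi, rfl⟩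
    · exact hj c h1
    · exact h _ (Or.inr ⟨p, hj p hp, i, hi, rfl⟩)
  intro k
  induction k with
  | zero => exact fun c hc => pvReach_mono board R C S (Nat.zero_le m) c hc
  | succ k ih => exact step k ih

def pvIsG (board : List String) (c : Int × Int) : Prop := pvCharAt board c.1 c.2 = 'G'

def pvHit (board : List String) (R C : Int) (S : List (Int × Int)) (k : Nat) : Prop :=
  ∃ c, pvReach board R C S k c ∧ pvIsG board c

noncomputable def pvLeastHit (board : List String) (R C : Int) (S : List (Int × Int)) :
    Option Nat :=
  letI : ∀ k, Decidable (pvHit board R C S k) := fun _ => Classical.propDecidable _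
  letI : Decidable (∃ k, pvHit board R C S k) := Classical.propDecidable _
  if h : ∃ k, pvHit board R C S k then some (Nat.find h) else none

theorem pvLeastHit_eq_some (board : List String) (R C : Int) (S : List (Int × Int)) (K : Nat)
    (h1 : pvHit board R C S K) (h2 : ∀ j < K, ¬ pvHit board R C S j) :
    pvLeastHit board R C S = some K := by
  unfold pvLeastHit
  letI : ∀ k, Decidable (pvHit board R C S k) := fun _ => Classical.propDecidable _
  letI : Decidable (∃ k, pvHit board R C S k) := Classical.propDecidable _
  rw [dif_pos ⟨K, h1⟩]
  congr 1
  rw [Nat.find_eq_iff]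
  exact ⟨h1, h2⟩

theorem pvLeastHit_eq_none (board : List String) (R C : Int) (S : List (Int × Int))
    (h : ∀ k, ¬ pvHit board R C S k) : pvLeastHit board R C S = none := by
  unfold pvLeastHit
  rw [dif_neg]
  rintro ⟨k, hk⟩
  exact h k hk

-- full specification of folding A's four-direction body over an index list
theorem pvSteps_spec (board : List String) (R C : Int) (c : Int × Int) (a : Nat) (ha : a ≠ 0) :
    ∀ (is : List Nat) (v : List (List Nat)) (q : List (Int × Int)),
      pvGetv R C v c = some a →
      (∀ x, pvGetv R C v x ≠ some 0 →
        pvGetv R C (is.foldl (pvStepA board R C c) (v, q)).1 x = pvGetv R C v x) ∧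
      (∀ x, pvGetv R C (is.foldl (pvStepA board R C c) (v, q)).1 x = some 0 →
        pvGetv R C v x = some 0) ∧
      (∀ x, x ∈ (is.foldl (pvStepA board R C c) (v, q)).2 ↔
        x ∈ q ∨ (pvGetv R C v x = some 0 ∧ ∃ i ∈ is, x = pvNbr board R C i c)) ∧
      (∀ x, x ∈ (is.foldl (pvStepA board R C c) (v, q)).2 → x ∉ q →
        pvGetv R C (is.foldl (pvStepA board R C c) (v, q)).1 x = some (a + 1)) ∧
      (∀ x, pvGetv R C (is.foldl (pvStepA board R C c) (v, q)).1 x ≠ pvGetv R C v x →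
        x ∈ (is.foldl (pvStepA board R C c) (v, q)).2 ∧ pvGetv R C v x = some 0) ∧
      (pvZeros (is.foldl (pvStepA board R C c) (v, q)).1 +
          (is.foldl (pvStepA board R C c) (v, q)).2.length = pvZeros v + q.length) := by
  intro is
  induction is with
  | nil =>
    intro v q hc
    refine ⟨fun x _ => rfl, fun x h => h, fun x => by simp, fun x hx hq => absurd hx hq,
      fun x h => absurd rfl h, rfl⟩
  | cons i is ih =>
    intro v q hc
    rw [List.foldl_cons]
    by_cases hpush : pvGetv R C v (pvNbr board R C i c) = some 0
    · have hcn : c ≠ pvNbr board R C i c := by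
        intro e
        rw [← e, hc] at hpush
        simp at hpush
        omega
      have hstep : pvStepA board R C c (v, q) i =
          (pvSetv R C v (pvNbr board R C i c) (a + 1), q ++ [pvNbr board R C i c]) := by
        unfold pvStepA
        rw [if_pos hpush, hc]
        rfl
      rw [hstep]
      have hget1 : ∀ x, pvGetv R C (pvSetv R C v (pvNbr board R C i c) (a + 1)) x =
          if x = pvNbr board R C i c then some (a + 1) else pvGetv R C v x :=
        fun x => pvGetv_setv R C v (pvNbr board R C i c) x (a + 1) 0 hpush
      have hc1 : pvGetv R C (pvSetv R C v (pvNbr board R C i c) (a + 1)) c = some a := by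
        rw [hget1, if_neg hcn]
        exact hc
      obtain ⟨I1, I2, I3, I4, I5, I6⟩ :=
        ih (pvSetv R C v (pvNbr board R C i c) (a + 1)) (q ++ [pvNbr board R C i c]) hc1
      refine ⟨?_, ?_, ?_, ?_, ?_, ?_⟩
      · intro x hx
        have hxn : x ≠ pvNbr board R C i c := by
          intro e
          rw [e] at hx
          exact hx hpush
        rw [I1 x (by rw [hget1, if_neg hxn]; exact hx), hget1, if_neg hxn]
      · intro x h2
        have h3 := I2 x h2
        rw [hget1] at h3
        by_cases hxn : x = pvNbr board R C i c
        · rw [if_pos hxn] at h3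
          simp at h3
        · rw [if_neg hxn] at h3
          exact h3
      · intro x
        rw [I3 x]
        constructor
        · rintro (hq1 | ⟨h0, i', hi', hx⟩)
          · rcases List.mem_append.mp hq1 with hq2 | hq2
            · exact Or.inl hq2
            · have hx : x = pvNbr board R C i c := by simpa using hq2
              exact Or.inr ⟨hx ▸ hpush, i, by simp, hx⟩
          · have hxn : x ≠ pvNbr board R C i c := by
              intro e
              rw [hget1, if_pos e] at h0
              simp at h0
            rw [hget1, if_neg hxn] at h0
            exact Or.inr ⟨h0, i', by simp [hi'], hx⟩
        · rintro (hq1 | ⟨h0, i', hi', hx⟩)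
          · exact Or.inl (List.mem_append.mpr (Or.inl hq1))
          · rcases List.mem_cons.mp hi' with e | hi2
            · subst e
              exact Or.inl (List.mem_append.mpr (Or.inr (by simp [hx])))
            · by_cases hxn : x = pvNbr board R C i c
              · exact Or.inl (List.mem_append.mpr (Or.inr (by simp [hxn])))
              · exact Or.inr ⟨by rw [hget1, if_neg hxn]; exact h0, i', hi2, hx⟩
      · intro x hxF hxq
        by_cases hxn : x = pvNbr board R C i c
        · rw [hxn]
          rw [I1 _ (by rw [hget1, if_pos rfl]; simp), hget1, if_pos rfl]
        · refine I4 x hxF ?_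
          intro hmem
          rcases List.mem_append.mp hmem with h | h
          · exact hxq h
          · exact hxn (by simpa using h)
      · intro x hne
        by_cases hne1 : pvGetv R C (is.foldl (pvStepA board R C c)
            (pvSetv R C v (pvNbr board R C i c) (a + 1), q ++ [pvNbr board R C i c])).1 x =
            pvGetv R C (pvSetv R C v (pvNbr board R C i c) (a + 1)) x
        · have hxn : x = pvNbr board R C i c := by
            by_contra hxn
            rw [hne1, hget1, if_neg hxn] at hne
            exact hne rfl
          refine ⟨(I3 x).mpr (Or.inl (List.mem_append.mpr (Or.inr (by simp [hxn])))),
            hxn ▸ hpush⟩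
        · obtain ⟨hmem, h0⟩ := I5 x hne1
          refine ⟨hmem, ?_⟩
          rw [hget1] at h0
          by_cases hxn : x = pvNbr board R C i c
          · rw [if_pos hxn] at h0
            simp at h0
          · rw [if_neg hxn] at h0
            exact h0
      · have hz := pv_zeros_setv R C v (pvNbr board R C i c) (a + 1) hpush (by omega)
        rw [I6]
        simp only [List.length_append, List.length_cons, List.length_nil]
        omega
    · have hstep : pvStepA board R C c (v, q) i = (v, q) := by
        unfold pvStepA
        rw [if_neg hpush]
      rw [hstep]
      obtain ⟨I1, I2, I3, I4, I5, I6⟩ := ih v q hc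
      refine ⟨I1, I2, ?_, I4, I5, I6⟩
      intro x
      rw [I3 x]
      constructor
      · rintro (hq1 | ⟨h0, i', hi', hx⟩)
        · exact Or.inl hq1
        · exact Or.inr ⟨h0, i', by simp [hi'], hx⟩
      · rintro (hq1 | ⟨h0, i', hi', hx⟩)
        · exact Or.inl hq1
        · rcases List.mem_cons.mp hi' with e | hi2
          · subst e
            rw [hx] at h0
            exact absurd h0 hpush
          · exact Or.inr ⟨h0, i', hi2, hx⟩

-- processing a whole frontier (fold of pvExpandA over its cells)
def pvExpandAll (board : List String) (R C : Int) (F : List (Int × Int))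
    (st : List (List Nat) × List (Int × Int)) : List (List Nat) × List (Int × Int) :=
  F.foldl (fun st c => pvExpandA board R C c st) st

theorem pvExpandA_spec (board : List String) (R C : Int) (c : Int × Int) (a : Nat) (ha : a ≠ 0)
    (v : List (List Nat)) (q : List (Int × Int)) (hc : pvGetv R C v c = some a) :
    (∀ x, pvGetv R C v x ≠ some 0 →
      pvGetv R C (pvExpandA board R C c (v, q)).1 x = pvGetv R C v x) ∧
    (∀ x, pvGetv R C (pvExpandA board R C c (v, q)).1 x = some 0 →
      pvGetv R C v x = some 0) ∧
    (∀ x, x ∈ (pvExpandA board R C c (v, q)).2 ↔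
      x ∈ q ∨ (pvGetv R C v x = some 0 ∧ ∃ i, i < 4 ∧ x = pvNbr board R C i c)) ∧
    (∀ x, x ∈ (pvExpandA board R C c (v, q)).2 → x ∉ q →
      pvGetv R C (pvExpandA board R C c (v, q)).1 x = some (a + 1)) ∧
    (∀ x, pvGetv R C (pvExpandA board R C c (v, q)).1 x ≠ pvGetv R C v x →
      x ∈ (pvExpandA board R C c (v, q)).2 ∧ pvGetv R C v x = some 0) ∧
    (pvZeros (pvExpandA board R C c (v, q)).1 + (pvExpandA board R C c (v, q)).2.length
      = pvZeros v + q.length) := by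
  unfold pvExpandA
  obtain ⟨I1, I2, I3, I4, I5, I6⟩ := pvSteps_spec board R C c a ha (List.range 4) v q hc
  exact ⟨I1, I2, fun x => by rw [I3 x]; simp [List.mem_range], I4, I5, I6⟩

theorem pvExpandAll_spec (board : List String) (R C : Int) (L : Nat) :
    ∀ (F : List (Int × Int)) (v : List (List Nat)) (q : List (Int × Int)),
      (∀ p ∈ F, pvGetv R C v p = some (L + 1)) →
      (∀ x, pvGetv R C v x ≠ some 0 →
        pvGetv R C (pvExpandAll board R C F (v, q)).1 x = pvGetv R C v x) ∧
      (∀ x, pvGetv R C (pvExpandAll board R C F (v, q)).1 x = some 0 →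
        pvGetv R C v x = some 0) ∧
      (∀ x, x ∈ (pvExpandAll board R C F (v, q)).2 ↔
        x ∈ q ∨ (pvGetv R C v x = some 0 ∧ ∃ p ∈ F, ∃ i, i < 4 ∧ x = pvNbr board R C i p)) ∧
      (∀ x, x ∈ (pvExpandAll board R C F (v, q)).2 → x ∉ q →
        pvGetv R C (pvExpandAll board R C F (v, q)).1 x = some (L + 2)) ∧
      (∀ x, pvGetv R C (pvExpandAll board R C F (v, q)).1 x ≠ pvGetv R C v x →
        x ∈ (pvExpandAll board R C F (v, q)).2 ∧ pvGetv R C v x = some 0) ∧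
      (pvZeros (pvExpandAll board R C F (v, q)).1 + (pvExpandAll board R C F (v, q)).2.length
        = pvZeros v + q.length) := by
  intro F
  induction F with
  | nil =>
    intro v q _
    exact ⟨fun x _ => rfl, fun x h => h, fun x => by simp [pvExpandAll],
      fun x hx hq => absurd hx hq, fun x h => absurd rfl h, rfl⟩
  | cons p F ih =>
    intro v q hF
    have hp : pvGetv R C v p = some (L + 1) := hF p (List.mem_cons_self)
    obtain ⟨S1, S2, S3, S4, S5, S6⟩ :=
      pvExpandA_spec board R C p (L + 1) (by omega) v q hp
    have hE : pvExpandAll board R C (p :: F) (v, q) =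
        pvExpandAll board R C F ((pvExpandA board R C p (v, q)).1,
          (pvExpandA board R C p (v, q)).2) := rfl
    have hF1 : ∀ p' ∈ F, pvGetv R C (pvExpandA board R C p (v, q)).1 p' = some (L + 1) := by
      intro p' hp'
      rw [S1 p' (by rw [hF p' (List.mem_cons_of_mem p hp')]; simp)]
      exact hF p' (List.mem_cons_of_mem p hp')
    obtain ⟨I1, I2, I3, I4, I5, I6⟩ :=
      ih (pvExpandA board R C p (v, q)).1 (pvExpandA board R C p (v, q)).2 hF1
    rw [hE]
    refine ⟨?_, ?_, ?_, ?_, ?_, ?_⟩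
    · intro x hx
      rw [I1 x (by rw [S1 x hx]; exact hx), S1 x hx]
    · intro x h2
      exact S2 x (I2 x h2)
    · intro x
      rw [I3 x]
      constructor
      · rintro (hq1 | ⟨h0, p', hp', hi⟩)
        · rcases (S3 x).mp hq1 with h | ⟨h0, hi⟩
          · exact Or.inl h
          · exact Or.inr ⟨h0, p, List.mem_cons_self, hi⟩
        · exact Or.inr ⟨S2 x h0, p', List.mem_cons_of_mem p hp', hi⟩
      · rintro (hq1 | ⟨h0, p', hp', hi⟩)
        · exact Or.inl ((S3 x).mpr (Or.inl hq1))
        · rcases List.mem_cons.mp hp' with e | hp2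
          · subst e
            exact Or.inl ((S3 x).mpr (Or.inr ⟨h0, hi⟩))
          · by_cases hx0 : pvGetv R C (pvExpandA board R C p (v, q)).1 x = some 0
            · exact Or.inr ⟨hx0, p', hp2, hi⟩
            · have hch : pvGetv R C (pvExpandA board R C p (v, q)).1 x ≠ pvGetv R C v x := by
                rw [h0]; exact hx0
              exact Or.inl ((S5 x hch).1)
    · intro x hxE hxq
      by_cases hx1 : x ∈ (pvExpandA board R C p (v, q)).2
      · have h4 := S4 x hx1 hxq
        rw [I1 x (by rw [h4]; simp), h4]
      · exact I4 x hxE hx1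
    · intro x hne
      by_cases hne1 : pvGetv R C (pvExpandAll board R C F
          ((pvExpandA board R C p (v, q)).1, (pvExpandA board R C p (v, q)).2)).1 x =
          pvGetv R C (pvExpandA board R C p (v, q)).1 x
      · have hne2 : pvGetv R C (pvExpandA board R C p (v, q)).1 x ≠ pvGetv R C v x := by
          rw [← hne1]; exact hne
        obtain ⟨hm, h0⟩ := S5 x hne2
        exact ⟨(I3 x).mpr (Or.inl hm), h0⟩
      · obtain ⟨hm, h0⟩ := I5 x hne1
        exact ⟨hm, S2 x h0⟩
    · rw [I6]
      exact S6

-- queue prefixes pass through A's four-direction body untouched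
theorem pvSteps_append (board : List String) (R C : Int) (c : Int × Int) :
    ∀ (is : List Nat) (v : List (List Nat)) (xs ys : List (Int × Int)),
      (is.foldl (pvStepA board R C c) (v, xs ++ ys)).1 =
        (is.foldl (pvStepA board R C c) (v, ys)).1 ∧
      (is.foldl (pvStepA board R C c) (v, xs ++ ys)).2 =
        xs ++ (is.foldl (pvStepA board R C c) (v, ys)).2 := by
  intro is
  induction is with
  | nil => intro v xs ys; exact ⟨rfl, rfl⟩
  | cons i is ih =>
    intro v xs ys
    rw [List.foldl_cons, List.foldl_cons]
    by_cases h : pvGetv R C v (pvNbr board R C i c) = some 0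
    · have e1 : pvStepA board R C c (v, xs ++ ys) i =
          (pvSetv R C v (pvNbr board R C i c) ((pvGetv R C v c).getD 0 + 1),
            (xs ++ ys) ++ [pvNbr board R C i c]) := by
        unfold pvStepA; rw [if_pos h]
      have e2 : pvStepA board R C c (v, ys) i =
          (pvSetv R C v (pvNbr board R C i c) ((pvGetv R C v c).getD 0 + 1),
            ys ++ [pvNbr board R C i c]) := by
        unfold pvStepA; rw [if_pos h]
      rw [e1, e2, List.append_assoc]
      exact ih _ xs (ys ++ [pvNbr board R C i c])
    · have e1 : pvStepA board R C c (v, xs ++ ys) i = (v, xs ++ ys) := by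
        unfold pvStepA; rw [if_neg h]
      have e2 : pvStepA board R C c (v, ys) i = (v, ys) := by
        unfold pvStepA; rw [if_neg h]
      rw [e1, e2]
      exact ih v xs ys

theorem pvExpandA_append (board : List String) (R C : Int) (c : Int × Int)
    (v : List (List Nat)) (xs ys : List (Int × Int)) :
    (pvExpandA board R C c (v, xs ++ ys)).1 = (pvExpandA board R C c (v, ys)).1 ∧
    (pvExpandA board R C c (v, xs ++ ys)).2 = xs ++ (pvExpandA board R C c (v, ys)).2 := by
  unfold pvExpandA
  exact pvSteps_append board R C c (List.range 4) v xs ys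

-- the BFS loop runs through a goal-free frontier prefix
theorem pvBfs_skip (board : List String) (R C : Int) :
    ∀ (F N : List (Int × Int)) (v : List (List Nat)),
      (∀ c ∈ F, ¬ pvIsG board c) →
      pvBfsA board R C (F ++ N) v =
        pvBfsA board R C (pvExpandAll board R C F (v, N)).2
          (pvExpandAll board R C F (v, N)).1 := by
  intro F
  induction F with
  | nil => intro N v _; rfl
  | cons c F ih =>
    intro N v hG
    have hc : ¬ pvIsG board c := hG c List.mem_cons_self
    rw [List.cons_append, pvBfsA, if_neg (show ¬(pvCharAt board c.1 c.2 = 'G') from hc)]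
    obtain ⟨hv1, hq1⟩ := pvExpandA_append board R C c v F N
    rw [hv1, hq1]
    exact ih (pvExpandA board R C c (v, N)).2 (pvExpandA board R C c (v, N)).1
      (fun c' hc' => hG c' (List.mem_cons_of_mem c hc'))

-- the BFS loop returns the current level value at the first goal cell of the frontier
theorem pvBfs_found (board : List String) (R C : Int) (L : Nat) :
    ∀ (F1 : List (Int × Int)) (g : Int × Int) (rest : List (Int × Int)) (v : List (List Nat)),
      (∀ c ∈ F1, ¬ pvIsG board c) → (∀ c ∈ F1, pvGetv R C v c = some (L + 1)) →
      pvIsG board g → pvGetv R C v g = some (L + 1) →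
      pvBfsA board R C (F1 ++ g :: rest) v = some (L + 1) := by
  intro F1
  induction F1 with
  | nil =>
    intro g rest v _ _ hg hvg
    rw [List.nil_append, pvBfsA, if_pos (show pvCharAt board g.1 g.2 = 'G' from hg), hvg]
    rfl
  | cons c F1 ih =>
    intro g rest v hG hv hg hvg
    have hvc : pvGetv R C v c = some (L + 1) := hv c List.mem_cons_self
    rw [List.cons_append, pvBfsA,
      if_neg (show ¬(pvCharAt board c.1 c.2 = 'G') from hG c List.mem_cons_self)]
    obtain ⟨S1, S2, S3, S4, S5, S6⟩ :=
      pvExpandA_spec board R C c (L + 1) (by omega) v (F1 ++ g :: rest) hvc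
    have hsplit : F1 ++ g :: rest = (F1 ++ [g]) ++ rest := by simp
    obtain ⟨hv1, hq1⟩ := pvExpandA_append board R C c v (F1 ++ [g]) rest
    rw [hsplit, hv1, hq1]
    have hpres : ∀ x, pvGetv R C v x = some (L + 1) →
        pvGetv R C (pvExpandA board R C c (v, rest)).1 x = some (L + 1) := by
      intro x hx
      obtain ⟨hv1', _⟩ := pvExpandA_append board R C c v (F1 ++ [g]) rest
      have h1 : pvGetv R C (pvExpandA board R C c (v, F1 ++ g :: rest)).1 x
          = pvGetv R C v x := S1 x (by rw [hx]; simp)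
      rw [hsplit] at h1
      rw [← hv1', h1]
      exact hx
    have : (F1 ++ [g]) ++ (pvExpandA board R C c (v, rest)).2 =
        F1 ++ g :: (pvExpandA board R C c (v, rest)).2 := by simp
    rw [this]
    exact ih g (pvExpandA board R C c (v, rest)).2 (pvExpandA board R C c (v, rest)).1
      (fun c' hc' => hG c' (List.mem_cons_of_mem c hc'))
      (fun c' hc' => hpres c' (hv c' (List.mem_cons_of_mem c hc')))
      hg (hpres g hvg)

theorem pv_split_first {α : Type} (p : α → Prop) :
    ∀ (l : List α), (∃ x ∈ l, p x) →
      ∃ l1 x l2, l = l1 ++ x :: l2 ∧ p x ∧ ∀ y ∈ l1, ¬ p y := by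
  intro l
  induction l with
  | nil => rintro ⟨x, h, _⟩; simp at h
  | cons a l ih =>
    intro h
    by_cases hpa : p a
    · exact ⟨[], a, l, rfl, hpa, by simp⟩
    · obtain ⟨x, hx, hpx⟩ := h
      rcases List.mem_cons.mp hx with e | hmem
      · exact absurd (e ▸ hpx) hpa
      · obtain ⟨l1, x', l2, he, hp', hn⟩ := ih ⟨x, hmem, hpx⟩
        refine ⟨a :: l1, x', l2, by rw [he]; rfl, hp', ?_⟩
        rintro y hy
        rcases List.mem_cons.mp hy with e | e
        · exact e ▸ hpa
        · exact hn y e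

-- the loop invariant of A's BFS, carried level by level
def pvINV (board : List String) (R C : Int) (S : List (Int × Int)) (L : Nat)
    (F : List (Int × Int)) (v : List (List Nat)) : Prop :=
  (∀ c, pvInb R C c → (pvGetv R C v c = some 0 ↔ ¬ pvReach board R C S L c)) ∧
  (∀ c ∈ F, pvInb R C c ∧ pvGetv R C v c = some (L + 1)) ∧
  (∀ c, pvReach board R C S L c → c ∈ F ∨ (0 < L ∧ pvReach board R C S (L - 1) c)) ∧
  (∀ c, pvIsG board c → pvReach board R C S L c → c ∈ F) ∧
  (∀ c, pvIsG board c → 0 < L → ¬ pvReach board R C S (L - 1) c)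

theorem pv_nohit_of_inv (board : List String) (R C : Int) (S : List (Int × Int)) (L : Nat)
    (v : List (List Nat)) (hinv : pvINV board R C S L [] v) :
    ∀ k, ¬ pvHit board R C S k := by
  obtain ⟨h1, h2, h3, h4, h5⟩ := hinv
  have hstep : ∀ c, pvReach board R C S (L + 1) c → pvReach board R C S L c := by
    rintro c (h | ⟨p, hp, i, hi, rfl⟩)
    · exact h
    · rcases h3 p hp with hpF | ⟨hL, hpPrev⟩
      · simp at hpF
      · have : pvReach board R C S ((L - 1) + 1) (pvNbr board R C i p) :=
          Or.inr ⟨p, hpPrev, i, hi, rfl⟩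
        rwa [Nat.sub_add_cancel hL] at this
  rintro k ⟨c, hr, hg⟩
  have hcl : pvReach board R C S L c := pvReach_stab board R C S L hstep k c hr
  have := h4 c hg hcl
  simp at this

theorem pvBfs_main (board : List String) (R C : Int) (S : List (Int × Int))
    (HS : ∀ s ∈ S, pvInb R C s) :
    ∀ (z : Nat) (v : List (List Nat)) (F : List (Int × Int)) (L : Nat),
      pvZeros v = z → pvINV board R C S L F v →
      pvBfsA board R C F v = (pvLeastHit board R C S).map (· + 1) := by
  intro z
  induction z using Nat.strong_induction_on with
  | _ z ih =>
    intro v F L hz hinv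
    obtain ⟨h1, h2, h3, h4, h5⟩ := hinv
    by_cases hGF : ∃ g ∈ F, pvIsG board g
    · obtain ⟨F1, g, F2, hFeq, hg, hF1⟩ := pv_split_first (pvIsG board) F hGF
      have hgF : g ∈ F := by rw [hFeq]; simp
      have hval : pvBfsA board R C F v = some (L + 1) := by
        rw [hFeq]
        exact pvBfs_found board R C L F1 g F2 v hF1
          (fun c hc => (h2 c (by rw [hFeq]; exact List.mem_append_left _ hc)).2)
          hg (h2 g hgF).2
      have hReachg : pvReach board R C S L g := by
        by_contra hr
        have h0 := (h1 g (h2 g hgF).1).mpr hr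
        rw [(h2 g hgF).2] at h0
        simp at h0
      have hmin : ∀ j < L, ¬ pvHit board R C S j := by
        rintro j hj ⟨c, hr, hgc⟩
        exact h5 c hgc (by omega)
          (pvReach_mono board R C S (by omega : j ≤ L - 1) c hr)
      rw [hval, pvLeastHit_eq_some board R C S L ⟨g, hReachg, hg⟩ hmin]
      rfl
    · push_neg at hGF
      cases F with
      | nil =>
        rw [pvLeastHit_eq_none board R C S
          (pv_nohit_of_inv board R C S L v ⟨h1, h2, h3, h4, h5⟩)]
        rw [pvBfsA]
        rfl
      | cons f F' =>
        obtain ⟨E1, E2, E3, E4, E5, E6⟩ :=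
          pvExpandAll_spec board R C L (f :: F') v [] (fun p hp => (h2 p hp).2)
        have hE3 : ∀ x, x ∈ (pvExpandAll board R C (f :: F') (v, [])).2 ↔
            (pvGetv R C v x = some 0 ∧ ∃ p ∈ f :: F', ∃ i, i < 4 ∧ x = pvNbr board R C i p) := by
          intro x
          rw [E3 x]
          simp
        have hskip := pvBfs_skip board R C (f :: F') [] v hGF
        rw [List.append_nil] at hskip
        have hchar : ∀ x, pvInb R C x → (pvReach board R C S (L + 1) x ↔
            pvReach board R C S L x ∨ (pvGetv R C v x = some 0 ∧
              ∃ p ∈ f :: F', ∃ i, i < 4 ∧ x = pvNbr board R C i p)) := by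
          intro x hx
          constructor
          · rintro (h | ⟨p, hp, i, hi, rfl⟩)
            · exact Or.inl h
            · rcases h3 p hp with hpF | ⟨hL, hpPrev⟩
              · by_cases hRx : pvReach board R C S L (pvNbr board R C i p)
                · exact Or.inl hRx
                · exact Or.inr ⟨(h1 _ hx).mpr hRx, p, hpF, i, hi, rfl⟩
              · refine Or.inl ?_
                have : pvReach board R C S ((L - 1) + 1) (pvNbr board R C i p) :=
                  Or.inr ⟨p, hpPrev, i, hi, rfl⟩
                rwa [Nat.sub_add_cancel hL] at this
          · rintro (h | ⟨h0, p, hp, i, hi, rfl⟩)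
            · exact Or.inl h
            · have hpReach : pvReach board R C S L p := by
                by_contra hr
                have := (h1 p (h2 p hp).1).mpr hr
                rw [(h2 p hp).2] at this
                simp at this
              exact Or.inr ⟨p, hpReach, i, hi, rfl⟩
        have hinv' : pvINV board R C S (L + 1) (pvExpandAll board R C (f :: F') (v, [])).2
            (pvExpandAll board R C (f :: F') (v, [])).1 := by
          refine ⟨?_, ?_, ?_, ?_, ?_⟩
          · intro x hx
            constructor
            · intro h0'
              intro hRx
              rcases (hchar x hx).mp hRx with hRL | hpc
              · exact ((h1 x hx).mp (E2 x h0')) hRL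
              · have hmem := (hE3 x).mpr hpc
                have := E4 x hmem (List.not_mem_nil)
                rw [this] at h0'
                simp at h0'
            · intro hnR
              have h0 : pvGetv R C v x = some 0 :=
                (h1 x hx).mpr (fun hRL => hnR (Or.inl hRL))
              by_cases hch : pvGetv R C (pvExpandAll board R C (f :: F') (v, [])).1 x =
                  pvGetv R C v x
              · rw [hch]; exact h0
              · obtain ⟨hm, _⟩ := E5 x hch
                exact absurd ((hchar x hx).mpr (Or.inr ((hE3 x).mp hm))) hnR
          · intro c' hc'
            obtain ⟨h0, p, hp, i, hi, hx⟩ := (hE3 c').mp hc'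
            refine ⟨hx ▸ pvNbr_inb board R C i p (h2 p hp).1, ?_⟩
            exact E4 c' hc' (List.not_mem_nil)
          · intro c' hR
            have hcInb := pvReach_inb board R C S HS (L + 1) c' hR
            rcases (hchar c' hcInb).mp hR with hRL | hpc
            · exact Or.inr ⟨by omega, by simpa using hRL⟩
            · exact Or.inl ((hE3 c').mpr hpc)
          · intro c' hgc hR
            have hcInb := pvReach_inb board R C S HS (L + 1) c' hR
            rcases (hchar c' hcInb).mp hR with hRL | hpc
            · exact absurd hgc (hGF c' (h4 c' hgc hRL))
            · exact (hE3 c').mpr hpc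
          · intro c' hgc _ hR
            simp only [Nat.add_sub_cancel] at hR
            exact (hGF c' (h4 c' hgc hR)) hgc
        by_cases hE2nil : (pvExpandAll board R C (f :: F') (v, [])).2 = []
        · rw [hskip, hE2nil]
          obtain ⟨a1, a2, a3, a4, a5⟩ := hinv'
          rw [hE2nil] at a2 a3 a4
          rw [pvLeastHit_eq_none board R C S
            (pv_nohit_of_inv board R C S (L + 1) (pvExpandAll board R C (f :: F') (v, [])).1
              ⟨a1, a2, a3, a4, a5⟩)]
          rw [pvBfsA]
          rfl
        · have hlen : 0 < (pvExpandAll board R C (f :: F') (v, [])).2.length :=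
            List.length_pos_of_ne_nil hE2nil
          have hzlt : pvZeros (pvExpandAll board R C (f :: F') (v, [])).1 < z := by
            rw [← hz]
            simp only [List.length_nil] at E6
            omega
          rw [hskip]
          exact ih _ hzlt _ _ (L + 1) rfl hinv'

-- the scan order of the R×C grid
def pvGrid (R C : Int) : List (Int × Int) :=
  (List.range R.toNat).flatMap
    (fun (i : Nat) => (List.range C.toNat).map (fun (j : Nat) => ((i : Int), (j : Int))))

theorem pv_foldl_flatMap {α β γ : Type} (g : α → List β) (f : γ → β → γ) :
    ∀ (l : List α) (init : γ),
      (l.flatMap g).foldl f init = l.foldl (fun b x => (g x).foldl f b) init := by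
  intro l
  induction l with
  | nil => intro init; rfl
  | cons x l ih =>
    intro init
    rw [List.flatMap_cons, List.foldl_append, List.foldl_cons]
    exact ih _

theorem pv_nested_eq_grid {γ : Type} (R C : Int) (f : γ → (Int × Int) → γ) (init : γ) :
    (List.range R.toNat).foldl (fun b (i : Nat) =>
      (List.range C.toNat).foldl (fun b (j : Nat) => f b ((i : Int), (j : Int))) b) init
      = (pvGrid R C).foldl f init := by
  rw [pvGrid, pv_foldl_flatMap]
  congr 1
  funext b i
  rw [List.foldl_map]

theorem pv_foldl_filter {α γ : Type} (p : α → Prop) [DecidablePred p] (f : γ → α → γ) :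
    ∀ (l : List α) (init : γ),
      (l.filter (fun x => decide (p x))).foldl f init
        = l.foldl (fun b x => if p x then f b x else b) init := by
  intro l
  induction l with
  | nil => intro init; rfl
  | cons x l ih =>
    intro init
    by_cases h : p x
    · rw [List.filter_cons_of_pos (by simpa using h), List.foldl_cons, List.foldl_cons, if_pos h]
      exact ih _
    · rw [List.filter_cons_of_neg (by simpa using h), List.foldl_cons, if_neg h]
      exact ih _

def pvRcells (board : List String) (R C : Int) : List (Int × Int) :=
  (pvGrid R C).filter (fun c => decide (pvCharAt board c.1 c.2 = 'R'))

theorem pv_mem_grid (R C : Int) (hR : 0 ≤ R) (hC : 0 ≤ C) (x : Int × Int) :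
    x ∈ pvGrid R C ↔ pvInb R C x := by
  obtain ⟨x1, x2⟩ := x
  unfold pvGrid pvInb
  constructor
  · intro h
    obtain ⟨i, hi, hmem⟩ := List.mem_flatMap.mp h
    obtain ⟨j, hj, he⟩ := List.mem_map.mp hmem
    rw [List.mem_range] at hi hj
    cases he
    refine ⟨?_, ?_, ?_, ?_⟩ <;> simp <;> omega
  · rintro ⟨h1, h2, h3, h4⟩
    simp only at h1 h2 h3 h4
    refine List.mem_flatMap.mpr ⟨x1.toNat, List.mem_range.mpr (by omega), ?_⟩
    refine List.mem_map.mpr ⟨x2.toNat, List.mem_range.mpr (by omega), ?_⟩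
    have e1 : ((x1.toNat : Int)) = x1 := by omega
    have e2 : ((x2.toNat : Int)) = x2 := by omega
    rw [e1, e2]

theorem pv_grid_nodup (R C : Int) : (pvGrid R C).Nodup := by
  unfold pvGrid
  rw [List.nodup_flatMap]
  constructor
  · intro i _
    exact (List.nodup_range).map (fun a b h => by
      have : ((a : Int), (b : Int)).2 = ((a : Int), (b : Int)).2 := rfl
      cases h
      rfl)
  · rw [List.pairwise_iff_getElem]
    intro a b ha hb hab
    simp only [Function.onFun]
    intro x hx1 hx2
    obtain ⟨j1, _, he1⟩ := List.mem_map.mp hx1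
    obtain ⟨j2, _, he2⟩ := List.mem_map.mp hx2
    rw [← he2] at he1
    have : ((List.range R.toNat)[a] : Int) = ((List.range R.toNat)[b] : Int) :=
      congrArg Prod.fst he1
    simp only [List.getElem_range] at this
    omega

theorem pv_grid_length (R C : Int) : (pvGrid R C).length = R.toNat * C.toNat := by
  unfold pvGrid
  rw [List.length_flatMap]
  simp [Function.comp]

theorem pv_mem_Rcells (board : List String) (R C : Int) (hR : 0 ≤ R) (hC : 0 ≤ C)
    (x : Int × Int) :
    x ∈ pvRcells board R C ↔ pvInb R C x ∧ pvCharAt board x.1 x.2 = 'R' := by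
  unfold pvRcells
  rw [List.mem_filter]
  simp [pv_mem_grid R C hR hC]

-- the minimum-update step of A's outer loop
def pvMinStep (ans r : Option Nat) : Option Nat :=
  match r, ans with
  | some r', some a => if r' < a then some r' else ans
  | some r', none => some r'
  | none, _ => ans

theorem pvMinStep_some_some (a r : Nat) :
    pvMinStep (some a) (some r) = if r < a then some r else some a := rfl

theorem pvMinStep_none_some (r : Nat) : pvMinStep none (some r) = some r := rfl

theorem pvMinStep_any_none (ans : Option Nat) : pvMinStep ans none = ans := rfl

-- one single-source run of A
def pvSingleRun (board : List String) (R C : Int) (c : Int × Int) : Option Nat :=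
  pvBfsA board R C [c]
    (pvSetv R C (List.replicate R.toNat (List.replicate C.toNat 0)) c 1)

theorem pv_foldMin_none : ∀ (l : List (Option Nat)) (acc : Option Nat),
    (∀ x ∈ l, x = none) → List.foldl pvMinStep acc l = acc := by
  intro l
  induction l with
  | nil => intro acc _; rfl
  | cons x l ih =>
    intro acc h
    rw [List.foldl_cons, h x List.mem_cons_self]
    exact ih acc (fun y hy => h y (List.mem_cons_of_mem x hy))

theorem pv_foldMin_some (K : Nat) : ∀ (l : List (Option Nat)) (acc : Option Nat),
    (∀ x ∈ l, ∀ m, x = some m → K ≤ m) →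
    ((∃ x ∈ l, x = some K) ∧ (acc = none ∨ ∃ a, acc = some a ∧ K ≤ a) ∨ acc = some K) →
    List.foldl pvMinStep acc l = some K := by
  intro l
  induction l with
  | nil =>
    rintro acc _ (⟨⟨x, hx, _⟩, _⟩ | hK)
    · simp at hx
    · exact hK
  | cons x l ih =>
    intro acc h1 h2
    rw [List.foldl_cons]
    apply ih (pvMinStep acc x) (fun y hy => h1 y (List.mem_cons_of_mem x hy))
    rcases h2 with ⟨⟨y, hy, hyK⟩, hacc⟩ | haccK
    · rcases List.mem_cons.mp hy with e | hmem
      · have hxK : x = some K := e ▸ hyK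
        subst hxK
        right
        rcases hacc with h | ⟨a, rfl, hKa⟩
        · subst h; rfl
        · rw [pvMinStep_some_some]
          by_cases hlt : K < a
          · rw [if_pos hlt]
          · rw [if_neg hlt]
            have : a = K := by omega
            rw [this]
      · left
        refine ⟨⟨y, hmem, hyK⟩, ?_⟩
        cases x with
        | none =>
          rw [pvMinStep_any_none]
          exact hacc
        | some m =>
          have hKm : K ≤ m := h1 (some m) List.mem_cons_self m rfl
          rcases hacc with h | ⟨a, rfl, hKa⟩
          · subst h
            rw [pvMinStep_none_some]
            exact Or.inr ⟨m, rfl, hKm⟩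
          · rw [pvMinStep_some_some]
            by_cases hlt : m < a
            · rw [if_pos hlt]
              exact Or.inr ⟨m, rfl, hKm⟩
            · rw [if_neg hlt]
              exact Or.inr ⟨a, rfl, hKa⟩
    · subst haccK
      cases x with
      | none => exact Or.inr rfl
      | some m =>
        have hKm : K ≤ m := h1 (some m) List.mem_cons_self m rfl
        right
        rw [pvMinStep_some_some, if_neg (by omega)]

-- initial invariant for one single-source run
theorem pv_inv0_single (board : List String) (R C : Int) (s : Int × Int) (hs : pvInb R C s) :
    pvINV board R C [s] 0 [s]
      (pvSetv R C (List.replicate R.toNat (List.replicate C.toNat 0)) s 1) := by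
  have hg : ∀ x, pvGetv R C
      (pvSetv R C (List.replicate R.toNat (List.replicate C.toNat 0)) s 1) x =
        if x = s then some 1
        else pvGetv R C (List.replicate R.toNat (List.replicate C.toNat 0)) x :=
    fun x => pvGetv_setv R C _ s x 1 0 (pvGetv_replicate R C s hs)
  refine ⟨?_, ?_, ?_, ?_, ?_⟩
  · intro c hc
    rw [hg c]
    by_cases e : c = s
    · rw [if_pos e]
      simp [pvReach, e]
    · rw [if_neg e, pvGetv_replicate R C c hc]
      simp [pvReach, e]
  · intro c hcmem
    have e : c = s := by simpa using hcmem
    subst e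
    exact ⟨hs, by rw [hg]; simp⟩
  · intro c h
    exact Or.inl (by simpa [pvReach] using h)
  · intro c _ h
    simpa [pvReach] using h
  · intro c _ h
    exact absurd h (by omega)

theorem pvHit_union (board : List String) (R C : Int) (S : List (Int × Int)) (k : Nat) :
    pvHit board R C S k ↔ ∃ s ∈ S, pvHit board R C [s] k := by
  constructor
  · rintro ⟨c, hr, hg⟩
    obtain ⟨s, hs, hr'⟩ := (pvReach_union board R C S k c).mp hr
    exact ⟨s, hs, c, hr', hg⟩
  · rintro ⟨s, hs, c, hr, hg⟩
    exact ⟨c, (pvReach_union board R C S k c).mpr ⟨s, hs, hr⟩, hg⟩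

theorem pvLeastHit_some_hit (board : List String) (R C : Int) (S : List (Int × Int)) (m : Nat)
    (h : pvLeastHit board R C S = some m) : pvHit board R C S m := by
  unfold pvLeastHit at h
  letI : ∀ k, Decidable (pvHit board R C S k) := fun _ => Classical.propDecidable _
  letI : Decidable (∃ k, pvHit board R C S k) := Classical.propDecidable _
  by_cases he : ∃ k, pvHit board R C S k
  · rw [dif_pos he] at h
    have hs := Nat.find_spec he
    rw [Option.some.injEq] at h
    exact h ▸ hs
  · rw [dif_neg he] at h
    simp at h

theorem pv_exists_least (board : List String) (R C : Int) (S : List (Int × Int)) :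
    ∀ (k : Nat), pvHit board R C S k →
      ∃ K, pvHit board R C S K ∧ ∀ j < K, ¬ pvHit board R C S j := by
  intro k
  induction k using Nat.strong_induction_on with
  | _ k ih =>
    intro hk
    by_cases h' : ∃ j, j < k ∧ pvHit board R C S j
    · obtain ⟨j, hj, hjh⟩ := h'
      exact ih j hj hjh
    · push_neg at h'
      exact ⟨k, hk, fun j hj => h' j hj⟩

def pvAnsFold (board : List String) (R C : Int) : Option Nat :=
  (pvRcells board R C).foldl (fun ans c => pvMinStep ans (pvSingleRun board R C c)) none

-- ===== B-side lemmas =====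

-- the inner fold of pvLevelStep appends exactly the not-yet-visited landing cells
theorem pv_fold_add_spec (ns : List (Int × Int)) :
    ∀ (V q : List (Int × Int)), V.Nodup →
      ∃ δ, (ns.foldl (fun st n => if PySem.Set.contains st.1 n then st
              else (PySem.Set.add st.1 n, st.2 ++ [n])) (V, q)) = (V ++ δ, q ++ δ) ∧
        (V ++ δ).Nodup ∧ (∀ x, x ∈ δ ↔ x ∉ V ∧ x ∈ ns) := by
  induction ns with
  | nil =>
    intro V q hV
    exact ⟨[], by simp, by simpa using hV, by simp⟩
  | cons n ns ih =>
    intro V q hV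
    rw [List.foldl_cons]
    by_cases hn : n ∈ V
    · rw [if_pos (by simpa [PySem.Set.contains_iff] using hn)]
      obtain ⟨δ, heq, hnd, hmem⟩ := ih V q hV
      refine ⟨δ, heq, hnd, fun x => ?_⟩
      rw [hmem x]
      constructor
      · rintro ⟨hxV, hx⟩
        exact ⟨hxV, List.mem_cons_of_mem n hx⟩
      · rintro ⟨hxV, hx⟩
        rcases List.mem_cons.mp hx with e | hx2
        · exact absurd (e ▸ hn) hxV
        · exact ⟨hxV, hx2⟩
    · rw [if_neg (by simpa [PySem.Set.contains_iff] using hn),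
        PySem.Set.add_of_not_mem hn]
      obtain ⟨δ, heq, hnd, hmem⟩ := ih (V ++ [n]) (q ++ [n])
        (by
          rw [List.nodup_append]
          exact ⟨hV, List.nodup_singleton n,
            fun a ha b hb => by simp only [List.mem_singleton] at hb; subst hb; exact fun e => hn (e ▸ ha)⟩)
      refine ⟨n :: δ, ?_, ?_, fun x => ?_⟩
      · rw [heq]
        simp
      · simpa using hnd
      · rw [List.mem_cons, hmem x]
        constructor
        · rintro (rfl | ⟨hxVn, hx⟩)
          · exact ⟨hn, List.mem_cons_self⟩
          · exact ⟨fun h => hxVn (List.mem_append_left _ h),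
              List.mem_cons_of_mem n hx⟩
        · rintro ⟨hxV, hx⟩
          rcases List.mem_cons.mp hx with e | hx2
          · exact Or.inl e
          · by_cases hxn : x = n
            · exact Or.inl hxn
            · exact Or.inr ⟨by simp [hxV, hxn], hx2⟩

-- folding pvLevelStep over the frontier: visited grows by exactly the fresh landing cells
theorem pv_level_fold_spec (board : List String) (R C : Int) :
    ∀ (F : List (Int × Int)) (V q : List (Int × Int)), V.Nodup →
      ∃ δ, F.foldl (pvLevelStep board R C) (V, q) = (V ++ δ, q ++ δ) ∧
        (V ++ δ).Nodup ∧
        (∀ x, x ∈ δ ↔ x ∉ V ∧ ∃ p ∈ F, x ∈ pvNbrsB board R C p) := by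
  intro F
  induction F with
  | nil =>
    intro V q hV
    exact ⟨[], by simp, by simpa using hV, by simp⟩
  | cons p F ih =>
    intro V q hV
    rw [List.foldl_cons]
    obtain ⟨δ1, heq1, hnd1, hmem1⟩ := pv_fold_add_spec (pvNbrsB board R C p) V q hV
    have hstep : pvLevelStep board R C (V, q) p = (V ++ δ1, q ++ δ1) := heq1
    rw [hstep]
    obtain ⟨δ2, heq2, hnd2, hmem2⟩ := ih (V ++ δ1) (q ++ δ1) hnd1
    refine ⟨δ1 ++ δ2, ?_, ?_, fun x => ?_⟩
    · rw [heq2]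
      simp
    · simpa [List.append_assoc] using hnd2
    · rw [List.mem_append, hmem1 x, hmem2 x]
      constructor
      · rintro (⟨hxV, hx⟩ | ⟨hxV1, p', hp', hx⟩)
        · exact ⟨hxV, p, List.mem_cons_self, hx⟩
        · exact ⟨fun h => hxV1 (List.mem_append_left _ h), p',
            List.mem_cons_of_mem p hp', hx⟩
      · rintro ⟨hxV, p', hp', hx⟩
        rcases List.mem_cons.mp hp' with e | hp2
        · exact Or.inl ⟨hxV, e ▸ hx⟩
        · by_cases hx1 : x ∈ δ1
          · exact Or.inl ((hmem1 x).mp hx1)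
          · exact Or.inr ⟨by simp [hxV, hx1], p', hp2, hx⟩

-- an empty frontier means the reach sets have stabilised: no level ever hits 'G'
theorem pv_no_hit_of_empty (board : List String) (R C : Int) (S : List (Int × Int)) (d : Nat)
    (h2 : ∀ c, ¬ (pvReach board R C S d c ∧ (d = 0 ∨ ¬ pvReach board R C S (d - 1) c)))
    (h3 : ∀ j, j < d → ¬ pvHit board R C S j) :
    ∀ k, ¬ pvHit board R C S k := by
  cases d with
  | zero =>
    have hempty : ∀ c, ¬ pvReach board R C S 0 c := fun c hc => h2 c ⟨hc, Or.inl rfl⟩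
    have hstep : ∀ c, pvReach board R C S 1 c → pvReach board R C S 0 c := by
      rintro c (h | ⟨p, hp, _⟩)
      · exact h
      · exact absurd hp (hempty p)
    rintro k ⟨c, hr, _⟩
    exact hempty c (pvReach_stab board R C S 0 hstep k c hr)
  | succ m =>
    have hstep : ∀ c, pvReach board R C S (m + 1) c → pvReach board R C S m c := by
      intro c hc
      by_contra hr
      exact h2 c ⟨hc, Or.inr (by simpa using hr)⟩
    rintro k ⟨c, hr, hg⟩
    exact h3 m (by omega) ⟨c, pvReach_stab board R C S m hstep k c hr, hg⟩

-- the invariant of B's level loop at level d: V = reach d, F = reach d \ reach (d-1),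
-- no goal cell below level d, V duplicate-free, and V grows at least once per level
def pvINVB (board : List String) (R C : Int) (S : List (Int × Int)) (d : Nat)
    (V F : List (Int × Int)) : Prop :=
  (∀ c, c ∈ V ↔ pvReach board R C S d c) ∧
  (∀ c, c ∈ F ↔ (pvReach board R C S d c ∧ (d = 0 ∨ ¬ pvReach board R C S (d - 1) c))) ∧
  (∀ j, j < d → ¬ pvHit board R C S j) ∧
  V.Nodup ∧
  (F ≠ [] → d < V.length)

-- B's level loop computes the least level that reaches a goal cell
theorem pvLevels_main (board : List String) (R C : Int) (hR0 : 0 ≤ R) (hC0 : 0 ≤ C)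
    (S : List (Int × Int)) (HS : ∀ s ∈ S, pvInb R C s) :
    ∀ (fuel : Nat) (V F : List (Int × Int)) (d : Nat),
      pvINVB board R C S d V F → (pvGrid R C).length < fuel + d →
      pvLevelsB board R C fuel V F d =
        (match pvLeastHit board R C S with
          | some K => (K : Int)
          | none => -1) := by
  intro fuel
  induction fuel with
  | zero =>
    rintro V F d ⟨h1, h2, h3, h4, h5⟩ hfuel
    have hVsub : V ⊆ pvGrid R C := fun c hc =>
      (pv_mem_grid R C hR0 hC0 c).mpr (pvReach_inb board R C S HS d c ((h1 c).mp hc))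
    have hVlen : V.length ≤ (pvGrid R C).length := (h4.subperm hVsub).length_le
    have hF : F = [] := by
      by_contra hF
      have := h5 hF
      omega
    have hnone := pvLeastHit_eq_none board R C S
      (pv_no_hit_of_empty board R C S d
        (fun c hc => by rw [hF] at h2; exact (List.not_mem_nil) ((h2 c).mpr hc)) h3)
    rw [hnone]
    rfl
  | succ fuel ih =>
    rintro V F d ⟨h1, h2, h3, h4, h5⟩ hfuel
    rw [pvLevelsB]
    by_cases hFnil : F = []
    · rw [if_pos (by simp [hFnil])]
      have hnone := pvLeastHit_eq_none board R C S
        (pv_no_hit_of_empty board R C S d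
          (fun c hc => by rw [hFnil] at h2; exact (List.not_mem_nil) ((h2 c).mpr hc)) h3)
      rw [hnone]
    · rw [if_neg (by simp [List.isEmpty_iff, hFnil])]
      by_cases hG : ∃ g ∈ F, pvCharAt board g.1 g.2 = 'G'
      · rw [if_pos (by
          obtain ⟨g, hg, hgc⟩ := hG
          exact List.any_eq_true.mpr ⟨g, hg, by simp [hgc]⟩)]
        obtain ⟨g, hgF, hgc⟩ := hG
        have hhit : pvHit board R C S d := ⟨g, ((h2 g).mp hgF).1, hgc⟩
        rw [pvLeastHit_eq_some board R C S d hhit h3]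
      · rw [if_neg (by
          simp only [List.any_eq_true, beq_iff_eq]
          rintro ⟨g, hg, hgc⟩
          exact hG ⟨g, hg, hgc⟩)]
        obtain ⟨δ, heq, hnodup, hmem⟩ := pv_level_fold_spec board R C F V [] h4
        rw [List.nil_append] at heq
        have hhd : ¬ pvHit board R C S d := by
          rintro ⟨c, hr, hgc⟩
          by_cases hc : d ≠ 0 ∧ pvReach board R C S (d - 1) c
          · exact h3 (d - 1) (by omega) ⟨c, hc.2, hgc⟩
          · have hcF : c ∈ F := (h2 c).mpr ⟨hr, by tauto⟩
            exact hG ⟨c, hcF, hgc⟩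
        have h3' : ∀ j, j < d + 1 → ¬ pvHit board R C S j := by
          intro j hj
          by_cases hjd : j = d
          · exact hjd ▸ hhd
          · exact h3 j (by omega)
        have hchar : ∀ x, pvReach board R C S (d + 1) x ↔
            pvReach board R C S d x ∨
              (x ∉ V ∧ ∃ p ∈ F, ∃ i, i < 4 ∧ x = pvNbr board R C i p) := by
          intro x
          constructor
          · rintro (h | ⟨p, hp, i, hi, rfl⟩)
            · exact Or.inl h
            · by_cases hpF : p ∈ F
              · by_cases hxV : pvNbr board R C i p ∈ V
                · exact Or.inl ((h1 _).mp hxV)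
                · exact Or.inr ⟨hxV, p, hpF, i, hi, rfl⟩
              · by_cases hd0 : d = 0
                · exact absurd ((h2 p).mpr ⟨hp, Or.inl hd0⟩) hpF
                · by_cases hdp : pvReach board R C S (d - 1) p
                  · refine Or.inl ?_
                    have : pvReach board R C S ((d - 1) + 1) (pvNbr board R C i p) :=
                      Or.inr ⟨p, hdp, i, hi, rfl⟩
                    rwa [Nat.sub_add_cancel (by omega)] at this
                  · exact absurd ((h2 p).mpr ⟨hp, Or.inr hdp⟩) hpF
          · rintro (h | ⟨hxV, p, hpF, i, hi, rfl⟩)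
            · exact Or.inl h
            · exact Or.inr ⟨p, ((h2 p).mp hpF).1, i, hi, rfl⟩
        have hmem' : ∀ x, x ∈ δ ↔
            x ∉ V ∧ ∃ p ∈ F, ∃ i, i < 4 ∧ x = pvNbr board R C i p := by
          intro x
          rw [hmem x]
          constructor
          · rintro ⟨hxV, p, hp, hx⟩
            obtain ⟨i, hi, rfl⟩ := (pv_mem_nbrsB board R C p x).mp hx
            exact ⟨hxV, p, hp, i, hi, rfl⟩
          · rintro ⟨hxV, p, hp, i, hi, rfl⟩
            exact ⟨hxV, p, hp, (pv_mem_nbrsB board R C p _).mpr ⟨i, hi, rfl⟩⟩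
        rw [heq]
        apply ih (V ++ δ) δ (d + 1) ?_ (by omega)
        refine ⟨?_, ?_, h3', hnodup, ?_⟩
        · intro x
          rw [List.mem_append, h1 x, hmem' x, hchar x]
        · intro x
          rw [hmem' x, hchar x]
          constructor
          · rintro ⟨hxV, hx⟩
            refine ⟨Or.inr ⟨hxV, hx⟩, Or.inr ?_⟩
            simpa [h1 x] using hxV
          · rintro ⟨hr, hd⟩
            rcases hd with hd | hd
            · omega
            · simp only [Nat.add_sub_cancel] at hd
              rcases hr with hr | hx
              · exact absurd hr hd
              · exact ⟨by simpa [h1 x] using hd, hx.2⟩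
        · intro hδ
          have := h5 hFnil
          have hδlen : 0 < δ.length := List.length_pos_of_ne_nil hδ
          rw [List.length_append]
          omega

-- B's initial frontier comprehension builds exactly the 'R' cells in grid order
theorem pv_filterMap_if {α β : Type} (f : α → β) (p : β → Prop) [DecidablePred p] :
    ∀ l : List α, l.filterMap (fun a => if p (f a) then some (f a) else none)
      = (l.map f).filter (fun b => decide (p b)) := by
  intro l
  induction l with
  | nil => rfl
  | cons a l ih =>
    by_cases h : p (f a) <;> simp [h, ih]

theorem pv_rcellsB_eq (board : List String) (R C : Int) :
    ((List.range R.toNat).flatMap (fun (i : Nat) =>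
      (List.range C.toNat).filterMap (fun (j : Nat) =>
        if pvCharAt board (i : Int) (j : Int) = 'R' then some ((i : Int), (j : Int)) else none)))
      = pvRcells board R C := by
  unfold pvRcells pvGrid
  rw [List.filter_flatMap]
  congr 1
  funext i
  exact pv_filterMap_if (fun (j : Nat) => ((i : Int), (j : Int)))
    (fun c => pvCharAt board c.1 c.2 = 'R') (List.range C.toNat)

theorem pv_rcells_nodup (board : List String) (R C : Int) : (pvRcells board R C).Nodup :=
  (pv_grid_nodup R C).filter _

-- initial invariant of B's loop: level 0, both V and F are the 'R' cells
theorem pv_inv0_levels (board : List String) (R C : Int) :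
    pvINVB board R C (pvRcells board R C) 0 (pvRcells board R C) (pvRcells board R C) := by
  refine ⟨?_, ?_, ?_, pv_rcells_nodup board R C, ?_⟩
  · intro c
    simp [pvReach]
  · intro c
    simp [pvReach]
  · intro j hj
    omega
  · intro h
    exact List.length_pos_of_ne_nil h

theorem solution_eq_alt (board : List String) : solution board = solution_alt board := by
  have hfoldA : (List.range ((board.length : Int)).toNat).foldl (fun ans (i : Nat) =>
      (List.range (PySem.Str.len ((PySem.List.pyGet? board 0).getD "")).toNat).foldl
        (fun ans (j : Nat) =>
          if pvCharAt board (i : Int) (j : Int) = 'R' then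
            pvMinStep ans (pvSingleRun board (board.length : Int)
              (PySem.Str.len ((PySem.List.pyGet? board 0).getD "")) ((i : Int), (j : Int)))
          else ans) ans) none
      = pvAnsFold board (board.length : Int) (PySem.Str.len ((PySem.List.pyGet? board 0).getD "")) :=
    (pv_nested_eq_grid _ _ (fun b x => if pvCharAt board x.1 x.2 = 'R' then
        pvMinStep b (pvSingleRun board (board.length : Int)
          (PySem.Str.len ((PySem.List.pyGet? board 0).getD "")) x) else b) none).trans
      (pv_foldl_filter _ _ _ _).symm
  have hA : solution board =
      (match pvAnsFold board (board.length : Int)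
          (PySem.Str.len ((PySem.List.pyGet? board 0).getD "")) with
        | some a => (a : Int) - 1
        | none => -1) := by
    rw [← hfoldA]
    rfl
  have hB : solution_alt board =
      pvLevelsB board (board.length : Int) (PySem.Str.len ((PySem.List.pyGet? board 0).getD ""))
        ((board.length : Int).toNat * (PySem.Str.len ((PySem.List.pyGet? board 0).getD "")).toNat + 1)
        (PySem.Set.ofList (pvRcells board (board.length : Int)
          (PySem.Str.len ((PySem.List.pyGet? board 0).getD ""))))
        (pvRcells board (board.length : Int)
          (PySem.Str.len ((PySem.List.pyGet? board 0).getD ""))) 0 := by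
    rw [solution_alt]
    rw [pv_rcellsB_eq]
  rw [hA, hB]
  -- names for the two dimensions
  generalize hCv : PySem.Str.len ((PySem.List.pyGet? board 0).getD "") = Cv at *
  generalize hRv : (board.length : Int) = Rv at *
  have hR0 : 0 ≤ Rv := by omega
  have hC0 : 0 ≤ Cv := by
    rw [← hCv, PySem.Str.len_eq]
    omega
  have hSinb : ∀ s ∈ pvRcells board Rv Cv, pvInb Rv Cv s :=
    fun s hs => ((pv_mem_Rcells board Rv Cv hR0 hC0 s).mp hs).1
  -- B: one multi-source level walk
  have hBval : pvLevelsB board Rv Cv (Rv.toNat * Cv.toNat + 1)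
      (PySem.Set.ofList (pvRcells board Rv Cv)) (pvRcells board Rv Cv) 0 =
        (match pvLeastHit board Rv Cv (pvRcells board Rv Cv) with
          | some K => (K : Int)
          | none => -1) := by
    rw [PySem.Set.ofList_eq_self_of_nodup _ (pv_rcells_nodup board Rv Cv)]
    exact pvLevels_main board Rv Cv hR0 hC0 (pvRcells board Rv Cv) hSinb
      (Rv.toNat * Cv.toNat + 1) (pvRcells board Rv Cv) (pvRcells board Rv Cv) 0
      (pv_inv0_levels board Rv Cv) (by rw [pv_grid_length]; omega)
  rw [hBval]
  -- A: min over single-source runs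
  have hsingle : ∀ c ∈ pvRcells board Rv Cv, pvSingleRun board Rv Cv c =
      (pvLeastHit board Rv Cv [c]).map (· + 1) := by
    intro c hc
    exact pvBfs_main board Rv Cv [c]
      (fun s hs => by rw [List.mem_singleton] at hs; exact hs ▸ hSinb c hc) _ _ _ 0 rfl
      (pv_inv0_single board Rv Cv c (hSinb c hc))
  have hAfold : pvAnsFold board Rv Cv =
      ((pvRcells board Rv Cv).map (fun c => pvSingleRun board Rv Cv c)).foldl pvMinStep none := by
    rw [pvAnsFold, List.foldl_map]
  rw [hAfold]
  by_cases hEx : ∃ k, pvHit board Rv Cv (pvRcells board Rv Cv) k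
  · obtain ⟨k0, hk0⟩ := hEx
    obtain ⟨K, hK, hKmin⟩ := pv_exists_least board Rv Cv (pvRcells board Rv Cv) k0 hk0
    have hLH : pvLeastHit board Rv Cv (pvRcells board Rv Cv) = some K :=
      pvLeastHit_eq_some board Rv Cv _ K hK hKmin
    obtain ⟨s0, hs0, hhs0⟩ := (pvHit_union board Rv Cv (pvRcells board Rv Cv) K).mp hK
    have hLH0 : pvLeastHit board Rv Cv [s0] = some K :=
      pvLeastHit_eq_some board Rv Cv [s0] K hhs0
        (fun j hj hhit => hKmin j hj
          ((pvHit_union board Rv Cv (pvRcells board Rv Cv) j).mpr ⟨s0, hs0, hhit⟩))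
    have hfoldval : ((pvRcells board Rv Cv).map
        (fun c => pvSingleRun board Rv Cv c)).foldl pvMinStep none = some (K + 1) := by
      apply pv_foldMin_some (K + 1)
      · intro x hx m hxm
        obtain ⟨c, hcS, rfl⟩ := List.mem_map.mp hx
        rw [hsingle c hcS] at hxm
        cases hlc : pvLeastHit board Rv Cv [c] with
        | none => rw [hlc] at hxm; simp at hxm
        | some mc =>
          rw [hlc] at hxm
          simp only [Option.map_some] at hxm
          have hhit := pvLeastHit_some_hit board Rv Cv [c] mc hlc
          have hhS : pvHit board Rv Cv (pvRcells board Rv Cv) mc :=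
            (pvHit_union board Rv Cv (pvRcells board Rv Cv) mc).mpr ⟨c, hcS, hhit⟩
          have hKmc : K ≤ mc := by
            by_contra h'
            exact hKmin mc (by omega) hhS
          rw [Option.some.injEq] at hxm
          omega
      · left
        refine ⟨⟨pvSingleRun board Rv Cv s0, List.mem_map.mpr ⟨s0, hs0, rfl⟩, ?_⟩, Or.inl rfl⟩
        rw [hsingle s0 hs0, hLH0]
        rfl
    rw [hfoldval, hLH]
    push_cast
    ring
  · have hnone : pvLeastHit board Rv Cv (pvRcells board Rv Cv) = none :=
      pvLeastHit_eq_none board Rv Cv _ (fun k hk => hEx ⟨k, hk⟩)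
    have hallnone : ∀ x ∈ (pvRcells board Rv Cv).map (fun c => pvSingleRun board Rv Cv c),
        x = none := by
      intro x hx
      obtain ⟨c, hcS, rfl⟩ := List.mem_map.mp hx
      rw [hsingle c hcS, pvLeastHit_eq_none board Rv Cv [c]
        (fun k hk => hEx ⟨k, (pvHit_union board Rv Cv (pvRcells board Rv Cv) k).mpr
          ⟨c, hcS, hk⟩⟩)]
      rfl
    rw [pv_foldMin_none _ _ hallnone, hnone]

-- ===== VERDICT (by name: the statement is the Claim_ definition above) =====
theorem solution_spec : Claim_equal_solution := by
  intro board _ _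
  unfold Spec_solution
  exact solution_eq_alt board
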